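-- pv_equiv track=rewrite | github.com/Cladoniaconfusa/uniprotviewer | uniprotviewerV0.3/VER_AND.py | verificar_and
-- ===== SOURCE A (Python) =====
-- def verificar_and(memory:list,queries:list)->bool:
--     cnt = len(queries)
--     for termino in queries:
--         value_to_match,campo = termino.split(".in.")
--         for line in memory:
--             campo_bd = line[:2]
--             value_bd = line[2:].strip()
--             if campo == campo_bd and value_to_match in value_bd :
--                 cnt -=1
--                 break
--     return(cnt == 0)
-- ===== SOURCE B (Python) =====
-- def verificar_and(memory: list, queries: list) -> bool:
--     # Build an index: field prefix -> list of stripped values, in memory order.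
--     index = {}
--     for line in memory:
--         index.setdefault(line[:2], []).append(line[2:].strip())
--     for termino in queries:
--         value_to_match, campo = termino.split(".in.")
--         if not any(value_to_match in v for v in index.get(campo, [])):
--             return False
--     return True
-- ===== Notes on version B (the rewrite author's own statement) =====
-- stated objective: alternative
-- what changed: B first groups memory once into a dict from the 2-char field prefix to its stripped values and then answers each query by one bucket lookup with short-circuiting all/any, instead of A's per-query rescans of the whole memory with a counter.
import Mathlib
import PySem

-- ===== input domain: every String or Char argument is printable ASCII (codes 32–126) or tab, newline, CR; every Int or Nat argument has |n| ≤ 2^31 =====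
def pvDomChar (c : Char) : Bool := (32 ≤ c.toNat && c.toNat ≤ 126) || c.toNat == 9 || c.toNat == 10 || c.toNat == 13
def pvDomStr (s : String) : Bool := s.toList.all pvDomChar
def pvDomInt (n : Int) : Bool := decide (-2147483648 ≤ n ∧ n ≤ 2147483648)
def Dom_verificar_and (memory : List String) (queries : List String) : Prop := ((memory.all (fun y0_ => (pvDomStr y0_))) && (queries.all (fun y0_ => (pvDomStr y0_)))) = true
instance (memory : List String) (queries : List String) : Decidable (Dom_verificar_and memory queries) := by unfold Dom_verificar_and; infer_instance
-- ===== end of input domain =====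

-- B builds a field-prefix → stripped-values index once and answers each query by one bucket lookup
-- (short-circuiting all/any), instead of A's per-query rescans of the whole memory with a counter.


-- ===== PORT A =====
-- the inner 'for line in memory: … break' loop of A
def vaFind (memory : List String) (campo : String) (value_to_match : String) : Bool :=
  match memory with
  | [] => false
  | line :: rest =>
    let campo_bd := PySem.Str.slice line none (some 2)
    let value_bd := PySem.Str.strip (PySem.Str.slice line (some 2) none)
    if campo == campo_bd && PySem.Str.isIn value_to_match value_bd then true
    else vaFind rest campo value_to_match

def verificar_and (memory : List String) (queries : List String) : Bool :=
  let cnt : Int := queries.length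
  let cnt := queries.foldl (fun cnt termino =>
    -- 'value_to_match, campo = termino.split(".in.")': Pre_ guarantees exactly two parts
    let parts := (PySem.Str.split? termino ".in.").getD []
    let value_to_match := parts.getD 0 ""
    let campo := parts.getD 1 ""
    if vaFind memory campo value_to_match then cnt - 1 else cnt) cnt
  cnt == 0

-- ===== PORT B =====
-- 'index.setdefault(line[:2], []).append(line[2:].strip())' (overwrite-in-place keeps key position)
def vbIndex (memory : List String) : PySem.Dict String (List String) :=
  memory.foldl (fun d line =>
    let campo := PySem.Str.slice line none (some 2)
    d.insert campo (d.getD campo [] ++ [PySem.Str.strip (PySem.Str.slice line (some 2) none)]))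
    PySem.Dict.empty

-- the query loop with its early 'return False'
def vbCheck (index : PySem.Dict String (List String)) (queries : List String) : Bool :=
  match queries with
  | [] => true
  | termino :: rest =>
    let parts := (PySem.Str.split? termino ".in.").getD []
    let value_to_match := parts.getD 0 ""
    let campo := parts.getD 1 ""
    if (index.getD campo []).any (fun v => PySem.Str.isIn value_to_match v) then
      vbCheck index rest
    else false

def verificar_and_alt (memory : List String) (queries : List String) : Bool :=
  vbCheck (vbIndex memory) queries

-- ===== PRECONDITION & SPEC =====
-- Pre_ excludes malformed queries (not exactly one ".in."), on which Python A's tuple unpacking raises ValueError.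
def Pre_verificar_and (memory : List String) (queries : List String) : Prop :=
  ∀ q ∈ queries, ((PySem.Str.split? q ".in.").getD []).length = 2
instance (memory : List String) (queries : List String) : Decidable (Pre_verificar_and memory queries) := by unfold Pre_verificar_and; infer_instance

def pvWitness_verificar_and : List String × List String := (["abfoo bar", "cdbaz"], ["foo.in.ab", "baz.in.cd"])

def Spec_verificar_and (memory : List String) (queries : List String) (out : Bool) : Prop := out = verificar_and_alt memory queries
instance (memory : List String) (queries : List String) (out : Bool) : Decidable (Spec_verificar_and memory queries out) := by unfold Spec_verificar_and; infer_instance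

-- ===== CLAIM (what is proved, stated in full; the proofs are below) =====
def Claim_equal_verificar_and : Prop := ∀ (memory : List String) (queries : List String), Dom_verificar_and memory queries → Pre_verificar_and memory queries → Spec_verificar_and memory queries (verificar_and memory queries)

-- ===== LEMMAS AND PROOFS =====

-- the per-query predicate both programs decide
def pvPred (memory : List String) (termino : String) : Bool :=
  let parts := (PySem.Str.split? termino ".in.").getD []
  vaFind memory (parts.getD 1 "") (parts.getD 0 "")

def pvPref (line : String) : String := PySem.Str.slice line none (some 2)
def pvVal (line : String) : String := PySem.Str.strip (PySem.Str.slice line (some 2) none)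

-- A's inner scan as a single 'any' over memory
theorem vaFind_eq_any (memory : List String) (campo v : String) :
    vaFind memory campo v
    = memory.any (fun l => (pvPref l == campo) && PySem.Str.isIn v (pvVal l)) := by
  induction memory with
  | nil => rfl
  | cons line rest ih =>
    show (if campo == pvPref line && PySem.Str.isIn v (pvVal line) then true
          else vaFind rest campo v) = _
    rw [List.any_cons, ih, show (campo == pvPref line) = (pvPref line == campo) from
      (by by_cases hq : campo = pvPref line
          · simp [hq]
          · simp [hq, Ne.symm hq])]
    by_cases h : (pvPref line == campo && PySem.Str.isIn v (pvVal line)) = true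
    · rw [if_pos h, h, Bool.true_or]
    · rw [if_neg h, Bool.not_eq_true] at *
      rw [h, Bool.false_or]

-- the bucket for key k of the index built over memory on top of d
theorem vbIndex_getD (memory : List String) :
    ∀ (d : PySem.Dict String (List String)) (k : String),
    (memory.foldl (fun d line =>
      let campo := PySem.Str.slice line none (some 2)
      d.insert campo (d.getD campo [] ++ [PySem.Str.strip (PySem.Str.slice line (some 2) none)])) d).getD k []
    = d.getD k [] ++ (memory.filter (fun l => pvPref l == k)).map pvVal := by
  induction memory with
  | nil => intro d k; simp
  | cons line rest ih =>
    intro d k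
    simp only [List.foldl_cons, List.filter_cons]
    rw [ih]
    by_cases h : pvPref line == k
    · have hk : k = pvPref line := ((beq_iff_eq).mp h).symm
      simp only [h, if_pos]
      rw [show PySem.Str.slice line none (some 2) = pvPref line from rfl, ← hk,
        PySem.Dict.getD_insert_self]
      simp [pvVal, pvPref, hk]
    · have hne : k ≠ PySem.Str.slice line none (some 2) := by
        intro hk; exact h (by simp [pvPref, hk])
      simp only [h, Bool.false_eq_true, if_neg, not_false_iff]
      rw [PySem.Dict.getD_insert_of_ne _ _ _ hne]

-- bucket lookup + any = A's inner scan
theorem bucket_any (memory : List String) (campo v : String) :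
    ((vbIndex memory).getD campo []).any (fun x => PySem.Str.isIn v x)
    = vaFind memory campo v := by
  unfold vbIndex
  rw [vbIndex_getD memory PySem.Dict.empty campo, PySem.Dict.getD_empty, List.nil_append,
    List.any_map, vaFind_eq_any, List.any_filter]
  simp only [Function.comp]

-- B's query loop is 'all' of the shared predicate
theorem vbCheck_eq_all (memory : List String) (queries : List String) :
    vbCheck (vbIndex memory) queries = queries.all (pvPred memory) := by
  induction queries with
  | nil => rfl
  | cons t rest ih =>
    show (if ((vbIndex memory).getD (((PySem.Str.split? t ".in.").getD []).getD 1 "") []).any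
            (fun x => PySem.Str.isIn (((PySem.Str.split? t ".in.").getD []).getD 0 "") x)
          then vbCheck (vbIndex memory) rest else false)
        = (pvPred memory t && rest.all (pvPred memory))
    rw [bucket_any, ih]
    by_cases h : vaFind memory (((PySem.Str.split? t ".in.").getD []).getD 1 "")
        (((PySem.Str.split? t ".in.").getD []).getD 0 "") = true
    · rw [if_pos h, show pvPred memory t = true from h, Bool.true_and]
    · rw [Bool.not_eq_true] at h
      rw [if_neg (by rw [h]; simp), show pvPred memory t = false from h, Bool.false_and]

-- A's counter after the fold
theorem foldl_cnt (memory : List String) (queries : List String) :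
    ∀ c : Int,
    queries.foldl (fun cnt termino =>
      let parts := (PySem.Str.split? termino ".in.").getD []
      let value_to_match := parts.getD 0 ""
      let campo := parts.getD 1 ""
      if vaFind memory campo value_to_match then cnt - 1 else cnt) c
    = c - (queries.countP (pvPred memory) : Int) := by
  induction queries with
  | nil => intro c; simp
  | cons t rest ih =>
    intro c
    simp only [List.foldl_cons, List.countP_cons, pvPred]
    by_cases h : vaFind memory (((PySem.Str.split? t ".in.").getD []).getD 1 "")
        (((PySem.Str.split? t ".in.").getD []).getD 0 "") = true
    · simp only [h, if_pos, ih]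
      push_cast
      ring
    · rw [Bool.not_eq_true] at h
      simp only [h, Bool.false_eq_true, if_neg, not_false_iff, ih]
      simp

-- ===== VERDICT (by name: the statement is the Claim_ definition above) =====
theorem verificar_and_spec : Claim_equal_verificar_and := by
  intro memory queries _ _
  show verificar_and memory queries = verificar_and_alt memory queries
  show (queries.foldl (fun cnt termino =>
      let parts := (PySem.Str.split? termino ".in.").getD []
      let value_to_match := parts.getD 0 ""
      let campo := parts.getD 1 ""
      if vaFind memory campo value_to_match then cnt - 1 else cnt) (queries.length : Int) == 0)
    = vbCheck (vbIndex memory) queries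
  rw [foldl_cnt memory queries, vbCheck_eq_all]
  have hle := List.countP_le_length (l := queries) (p := pvPred memory)
  rcases Bool.eq_false_or_eq_true (queries.all (pvPred memory)) with hall | hall
  · rw [hall, beq_iff_eq]
    have heq : queries.countP (pvPred memory) = queries.length :=
      List.countP_eq_length.mpr (List.all_eq_true.mp hall)
    omega
  · rw [hall, beq_eq_false_iff_ne]
    have hne : queries.countP (pvPred memory) ≠ queries.length := by
      intro hc
      rw [List.countP_eq_length] at hc
      rw [List.all_eq_true.mpr hc] at hall
      simp at hall
    omega
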